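-- pv_equiv track=rewrite | github.com/YangZhi1605/reCode_demo_python | BackSupport/BackSupport/utils/wrben2_utils.py | count_diff_voltages_all
-- ===== SOURCE A (Python) =====
-- def count_diff_voltages_all(diff_voltages):
--     """
--     统计在0~50,50~150，150~200，200~300，300~500这几个区间的差值个数
--     Args:
--         diff_voltages: 传递上面得到的二维差值列表
--
--     Returns:
--         count_diff:统计结果
--
--     """
--     # 结果字典
--     count_diff = {
--         '0-50': 0,
--         '50-150': 0,
--         '150-200': 0,
--         '200-300': 0,
--         '300-500': 0
--     }
--     # 遍历每行数据，统计每行数据的差值在不同区间的个数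
--     for diff_voltage in diff_voltages:
--         for diff in diff_voltage:
--             if 0 <= diff <= 50:
--                 count_diff['0-50'] += 1
--             elif 50 < diff <= 150:
--                 count_diff['50-150'] += 1
--             elif 150 < diff <= 200:
--                 count_diff['150-200'] += 1
--             elif 200 < diff <= 300:
--                 count_diff['200-300'] += 1
--             elif 300 < diff <= 500:
--                 count_diff['300-500'] += 1
--     # 返回统计结果
--     return count_diff
-- ===== SOURCE B (Python) =====
-- def count_diff_voltages_all(diff_voltages):
--     # Table-driven binning: parallel key/bound tables and an index computed by
--     # counting strictly smaller bounds, instead of an if/elif cascade.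
--     keys = ['0-50', '50-150', '150-200', '200-300', '300-500']
--     bounds = [50, 150, 200, 300, 500]
--     counts = [0, 0, 0, 0, 0]
--     for row in diff_voltages:
--         for d in row:
--             if 0 <= d <= 500:
--                 idx = sum(1 for b in bounds if b < d)
--                 counts[idx] += 1
--     return dict(zip(keys, counts))
-- ===== Notes on version B (the rewrite author's own statement) =====
-- stated objective: alternative
-- what changed: Replaces the five-branch if/elif cascade updating a dict with a table-driven binning: parallel key/bound lists, a single 0<=d<=500 guard, the bin index computed by counting bounds below d, counters kept in a plain list and zipped with the keys at the end.
import Mathlib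
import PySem

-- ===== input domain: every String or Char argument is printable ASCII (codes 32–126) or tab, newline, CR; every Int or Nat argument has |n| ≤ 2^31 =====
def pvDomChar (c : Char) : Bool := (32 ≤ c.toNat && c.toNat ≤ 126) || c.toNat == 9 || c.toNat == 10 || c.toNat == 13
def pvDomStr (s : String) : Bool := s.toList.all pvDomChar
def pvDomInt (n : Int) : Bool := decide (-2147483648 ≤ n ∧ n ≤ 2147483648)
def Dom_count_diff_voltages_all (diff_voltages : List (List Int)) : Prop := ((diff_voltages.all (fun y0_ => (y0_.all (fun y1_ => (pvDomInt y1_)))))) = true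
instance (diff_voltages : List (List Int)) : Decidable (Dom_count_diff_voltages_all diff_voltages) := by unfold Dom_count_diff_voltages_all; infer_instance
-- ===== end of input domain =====

-- B replaces A's five-branch if/elif cascade over a dict with table-driven binning
-- (parallel key/bound lists, index = count of bounds below the value, list counters);
-- objective: alternative structure, same cost.

-- ===== PORT A =====
def count_diff_voltages_all (diff_voltages : List (List Int)) : List (String × Int) :=
  let init : PySem.Dict String Int :=
    PySem.Dict.ofList [("0-50", 0), ("50-150", 0), ("150-200", 0), ("200-300", 0), ("300-500", 0)]
  (diff_voltages.foldl (fun cd diff_voltage =>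
    diff_voltage.foldl (fun cd diff =>
      if 0 ≤ diff ∧ diff ≤ 50 then cd.modify "0-50" 0 (· + 1)
      else if 50 < diff ∧ diff ≤ 150 then cd.modify "50-150" 0 (· + 1)
      else if 150 < diff ∧ diff ≤ 200 then cd.modify "150-200" 0 (· + 1)
      else if 200 < diff ∧ diff ≤ 300 then cd.modify "200-300" 0 (· + 1)
      else if 300 < diff ∧ diff ≤ 500 then cd.modify "300-500" 0 (· + 1)
      else cd) cd) init).items

-- ===== PORT B =====
def pvKeysB : List String := ["0-50", "50-150", "150-200", "200-300", "300-500"]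
def pvBoundsB : List Int := [50, 150, 200, 300, 500]

def count_diff_voltages_all_alt (diff_voltages : List (List Int)) : List (String × Int) :=
  let counts : List Int := diff_voltages.foldl (fun counts row =>
    row.foldl (fun (counts : List Int) d =>
      if 0 ≤ d ∧ d ≤ 500 then
        let idx := pvBoundsB.countP (fun b => b < d)
        counts.set idx (counts.getD idx 0 + 1)
      else counts) counts) [0, 0, 0, 0, 0]
  pvKeysB.zip counts

-- ===== PRECONDITION & SPEC =====
def Spec_count_diff_voltages_all (diff_voltages : List (List Int)) (out : List (String × Int)) : Prop := out = count_diff_voltages_all_alt diff_voltages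
instance (diff_voltages : List (List Int)) (out : List (String × Int)) : Decidable (Spec_count_diff_voltages_all diff_voltages out) := by unfold Spec_count_diff_voltages_all; infer_instance

-- ===== CLAIM (what is proved, stated in full; the proofs are below) =====
def Claim_equal_count_diff_voltages_all : Prop := ∀ (diff_voltages : List (List Int)), Dom_count_diff_voltages_all diff_voltages → Spec_count_diff_voltages_all diff_voltages (count_diff_voltages_all diff_voltages)

-- ===== LEMMAS AND PROOFS =====

-- dict corresponding to a 5-counter state
def pvMkd (a b c d e : Int) : PySem.Dict String Int :=
  PySem.Dict.ofList [("0-50", a), ("50-150", b), ("150-200", c), ("200-300", d), ("300-500", e)]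

-- the two loop bodies, named so the fold lemmas can speak about them
def pvStepA (cd : PySem.Dict String Int) (diff : Int) : PySem.Dict String Int :=
  if 0 ≤ diff ∧ diff ≤ 50 then cd.modify "0-50" 0 (· + 1)
  else if 50 < diff ∧ diff ≤ 150 then cd.modify "50-150" 0 (· + 1)
  else if 150 < diff ∧ diff ≤ 200 then cd.modify "150-200" 0 (· + 1)
  else if 200 < diff ∧ diff ≤ 300 then cd.modify "200-300" 0 (· + 1)
  else if 300 < diff ∧ diff ≤ 500 then cd.modify "300-500" 0 (· + 1)
  else cd

def pvStepB (counts : List Int) (d : Int) : List Int :=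
  if 0 ≤ d ∧ d ≤ 500 then
    let idx := pvBoundsB.countP (fun b => b < d)
    counts.set idx (counts.getD idx 0 + 1)
  else counts

private lemma pvStep_eq (diff a b c d e : Int) :
    pvStepA (pvMkd a b c d e) diff
      = pvMkd ((pvStepB [a,b,c,d,e] diff).getD 0 0) ((pvStepB [a,b,c,d,e] diff).getD 1 0)
          ((pvStepB [a,b,c,d,e] diff).getD 2 0) ((pvStepB [a,b,c,d,e] diff).getD 3 0)
          ((pvStepB [a,b,c,d,e] diff).getD 4 0) := by
  by_cases h0 : 0 ≤ diff ∧ diff ≤ 50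
  · have h1 : ¬ (50:Int) < diff := by omega
    have h2 : ¬ (150:Int) < diff := by omega
    have h3 : ¬ (200:Int) < diff := by omega
    have h4 : ¬ (300:Int) < diff := by omega
    have h5 : ¬ (500:Int) < diff := by omega
    have h6 : diff ≤ 500 := by omega
    simp [pvStepA, pvStepB, pvBoundsB, pvMkd, h0, h1, h2, h3, h4, h5, h6, List.countP,
      List.countP.go, PySem.Dict.modify, PySem.Dict.ofList, PySem.Dict.update,
      PySem.Dict.insert, PySem.Dict.getD, PySem.Dict.get?, PySem.Dict.empty]
  · by_cases hb1 : 50 < diff ∧ diff ≤ 150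
    · have g1 : (0:Int) ≤ diff := by omega
      have h1 : (50:Int) < diff := by omega
      have h2 : ¬ (150:Int) < diff := by omega
      have h3 : ¬ (200:Int) < diff := by omega
      have h4 : ¬ (300:Int) < diff := by omega
      have h5 : ¬ (500:Int) < diff := by omega
      have h6 : diff ≤ 500 := by omega
      have n1 : ¬ diff ≤ (50:Int) := by omega
      simp [pvStepA, pvStepB, pvBoundsB, pvMkd, n1, g1, hb1, h2, h3, h4, h5, h6, List.countP,
        List.countP.go, PySem.Dict.modify, PySem.Dict.ofList, PySem.Dict.update,
        PySem.Dict.insert, PySem.Dict.getD, PySem.Dict.get?, PySem.Dict.empty]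
    · by_cases hb2 : 150 < diff ∧ diff ≤ 200
      · have g1 : (0:Int) ≤ diff := by omega
        have h1 : (50:Int) < diff := by omega
        have h2 : (150:Int) < diff := by omega
        have h3 : ¬ (200:Int) < diff := by omega
        have h4 : ¬ (300:Int) < diff := by omega
        have h5 : ¬ (500:Int) < diff := by omega
        have h6 : diff ≤ 500 := by omega
        have n1 : ¬ diff ≤ (50:Int) := by omega
        have n2 : ¬ diff ≤ (150:Int) := by omega
        simp [pvStepA, pvStepB, pvBoundsB, pvMkd, n1, n2, g1, hb2, h1, h3, h4, h5, h6, List.countP,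
          List.countP.go, PySem.Dict.modify, PySem.Dict.ofList, PySem.Dict.update,
          PySem.Dict.insert, PySem.Dict.getD, PySem.Dict.get?, PySem.Dict.empty]
      · by_cases hb3 : 200 < diff ∧ diff ≤ 300
        · have g1 : (0:Int) ≤ diff := by omega
          have h1 : (50:Int) < diff := by omega
          have h2 : (150:Int) < diff := by omega
          have h3 : (200:Int) < diff := by omega
          have h4 : ¬ (300:Int) < diff := by omega
          have h5 : ¬ (500:Int) < diff := by omega
          have h6 : diff ≤ 500 := by omega
          have n1 : ¬ diff ≤ (50:Int) := by omega
          have n2 : ¬ diff ≤ (150:Int) := by omega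
          have n3 : ¬ diff ≤ (200:Int) := by omega
          simp [pvStepA, pvStepB, pvBoundsB, pvMkd, n1, n2, n3, g1, hb3, h1, h2, h4, h5, h6,
            List.countP, List.countP.go, PySem.Dict.modify, PySem.Dict.ofList, PySem.Dict.update,
            PySem.Dict.insert, PySem.Dict.getD, PySem.Dict.get?, PySem.Dict.empty]
        · by_cases hb4 : 300 < diff ∧ diff ≤ 500
          · have g1 : (0:Int) ≤ diff := by omega
            have h1 : (50:Int) < diff := by omega
            have h2 : (150:Int) < diff := by omega
            have h3 : (200:Int) < diff := by omega
            have h4 : (300:Int) < diff := by omega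
            have h5 : ¬ (500:Int) < diff := by omega
            have h6 : diff ≤ 500 := by omega
            have n1 : ¬ diff ≤ (50:Int) := by omega
            have n2 : ¬ diff ≤ (150:Int) := by omega
            have n3 : ¬ diff ≤ (200:Int) := by omega
            have n4 : ¬ diff ≤ (300:Int) := by omega
            simp [pvStepA, pvStepB, pvBoundsB, pvMkd, n1, n2, n3, n4, g1, hb4, h1, h2, h3, h5,
              List.countP, List.countP.go, PySem.Dict.modify, PySem.Dict.ofList, PySem.Dict.update,
              PySem.Dict.insert, PySem.Dict.getD, PySem.Dict.get?, PySem.Dict.empty]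
          · have hg : ¬ (0 ≤ diff ∧ diff ≤ 500) := by omega
            simp [pvStepA, pvStepB, h0, hb1, hb2, hb3, hb4, hg]

private lemma pvStepB_len (cs : List Int) (x : Int) : (pvStepB cs x).length = cs.length := by
  unfold pvStepB; split <;> simp

private lemma pvFoldB_len (rows : List (List Int)) :
    ∀ cs : List Int, (rows.foldl (fun cs row => row.foldl pvStepB cs) cs).length = cs.length := by
  induction rows with
  | nil => simp
  | cons r rows ih =>
    intro cs
    have hr : ∀ (row : List Int) (cs : List Int), (row.foldl pvStepB cs).length = cs.length := by
      intro row
      induction row with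
      | nil => simp
      | cons x row ihx => intro cs; simp [List.foldl_cons, ihx, pvStepB_len]
    simp [List.foldl_cons, ih, hr]

private lemma pvList5 (l : List Int) (h : l.length = 5) :
    l = [l.getD 0 0, l.getD 1 0, l.getD 2 0, l.getD 3 0, l.getD 4 0] := by
  match l, h with
  | [a, b, c, d, e], _ => rfl

private lemma pvFoldRow_eq (row : List Int) : ∀ (a b c d e : Int),
    row.foldl pvStepA (pvMkd a b c d e)
      = pvMkd ((row.foldl pvStepB [a,b,c,d,e]).getD 0 0) ((row.foldl pvStepB [a,b,c,d,e]).getD 1 0)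
          ((row.foldl pvStepB [a,b,c,d,e]).getD 2 0) ((row.foldl pvStepB [a,b,c,d,e]).getD 3 0)
          ((row.foldl pvStepB [a,b,c,d,e]).getD 4 0) := by
  induction row with
  | nil => intro a b c d e; rfl
  | cons x row ih =>
    intro a b c d e
    have hshape : pvStepB [a,b,c,d,e] x
        = [(pvStepB [a,b,c,d,e] x).getD 0 0, (pvStepB [a,b,c,d,e] x).getD 1 0,
           (pvStepB [a,b,c,d,e] x).getD 2 0, (pvStepB [a,b,c,d,e] x).getD 3 0,
           (pvStepB [a,b,c,d,e] x).getD 4 0] :=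
      pvList5 _ (by simp [pvStepB_len])
    calc (x :: row).foldl pvStepA (pvMkd a b c d e)
        = row.foldl pvStepA (pvStepA (pvMkd a b c d e) x) := rfl
      _ = row.foldl pvStepA (pvMkd ((pvStepB [a,b,c,d,e] x).getD 0 0)
            ((pvStepB [a,b,c,d,e] x).getD 1 0) ((pvStepB [a,b,c,d,e] x).getD 2 0)
            ((pvStepB [a,b,c,d,e] x).getD 3 0) ((pvStepB [a,b,c,d,e] x).getD 4 0)) := by
            rw [pvStep_eq]
      _ = _ := by
            rw [ih]
            rw [show (x :: row).foldl pvStepB [a,b,c,d,e] = row.foldl pvStepB (pvStepB [a,b,c,d,e] x) from rfl]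
            rw [← hshape]

private lemma pvFoldAll_eq (rows : List (List Int)) : ∀ (a b c d e : Int),
    rows.foldl (fun cd row => row.foldl pvStepA cd) (pvMkd a b c d e)
      = pvMkd ((rows.foldl (fun cs row => row.foldl pvStepB cs) [a,b,c,d,e]).getD 0 0)
          ((rows.foldl (fun cs row => row.foldl pvStepB cs) [a,b,c,d,e]).getD 1 0)
          ((rows.foldl (fun cs row => row.foldl pvStepB cs) [a,b,c,d,e]).getD 2 0)
          ((rows.foldl (fun cs row => row.foldl pvStepB cs) [a,b,c,d,e]).getD 3 0)
          ((rows.foldl (fun cs row => row.foldl pvStepB cs) [a,b,c,d,e]).getD 4 0) := by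
  induction rows with
  | nil => intro a b c d e; rfl
  | cons r rows ih =>
    intro a b c d e
    have hlen : (r.foldl pvStepB [a,b,c,d,e]).length = 5 := by
      have : ∀ (row : List Int) (cs : List Int), (row.foldl pvStepB cs).length = cs.length := by
        intro row
        induction row with
        | nil => simp
        | cons x row ihx => intro cs; simp [List.foldl_cons, ihx, pvStepB_len]
      simp [this]
    have hshape := pvList5 _ hlen
    calc (r :: rows).foldl (fun cd row => row.foldl pvStepA cd) (pvMkd a b c d e)
        = rows.foldl (fun cd row => row.foldl pvStepA cd) (r.foldl pvStepA (pvMkd a b c d e)) := rfl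
      _ = rows.foldl (fun cd row => row.foldl pvStepA cd)
            (pvMkd ((r.foldl pvStepB [a,b,c,d,e]).getD 0 0) ((r.foldl pvStepB [a,b,c,d,e]).getD 1 0)
              ((r.foldl pvStepB [a,b,c,d,e]).getD 2 0) ((r.foldl pvStepB [a,b,c,d,e]).getD 3 0)
              ((r.foldl pvStepB [a,b,c,d,e]).getD 4 0)) := by rw [pvFoldRow_eq]
      _ = _ := by rw [ih, ← hshape]; rfl

-- ===== VERDICT (by name: the statement is the Claim_ definition above) =====
theorem count_diff_voltages_all_spec : Claim_equal_count_diff_voltages_all := by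
  intro dv _
  unfold Spec_count_diff_voltages_all count_diff_voltages_all count_diff_voltages_all_alt
  have hA : (dv.foldl (fun cd diff_voltage => diff_voltage.foldl
      (fun cd diff =>
        if 0 ≤ diff ∧ diff ≤ 50 then cd.modify "0-50" 0 (· + 1)
        else if 50 < diff ∧ diff ≤ 150 then cd.modify "50-150" 0 (· + 1)
        else if 150 < diff ∧ diff ≤ 200 then cd.modify "150-200" 0 (· + 1)
        else if 200 < diff ∧ diff ≤ 300 then cd.modify "200-300" 0 (· + 1)
        else if 300 < diff ∧ diff ≤ 500 then cd.modify "300-500" 0 (· + 1)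
        else cd) cd)
      (PySem.Dict.ofList [("0-50", 0), ("50-150", 0), ("150-200", 0), ("200-300", 0), ("300-500", 0)]))
      = dv.foldl (fun cd row => row.foldl pvStepA cd) (pvMkd 0 0 0 0 0) := rfl
  have hB : (dv.foldl (fun counts row => row.foldl
      (fun (counts : List Int) d =>
        if 0 ≤ d ∧ d ≤ 500 then
          let idx := pvBoundsB.countP (fun b => b < d)
          counts.set idx (counts.getD idx 0 + 1)
        else counts) counts) [0, 0, 0, 0, 0])
      = dv.foldl (fun cs row => row.foldl pvStepB cs) [0,0,0,0,0] := rfl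
  simp only [hA, hB, pvFoldAll_eq]
  have hlen : (dv.foldl (fun cs row => row.foldl pvStepB cs) ([0,0,0,0,0] : List Int)).length = 5 := by
    simp [pvFoldB_len]
  rw [pvList5 _ hlen]
  rfl
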